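-- pv_equiv track=rewrite | github.com/ebmm01/Compiladores-2019.1 | Tarefas/calculator.py | find_highest_precedence
-- ===== SOURCE A (Python) =====
-- precedences = {
--     '+': 1,
--     '-': 1,
--     '*': 2,
--     '/': 2,
--     '^': 3,
-- }
--
-- def find_highest_precedence(lexed):
--
--     high_index = (None, 0)
--     for lex in lexed:
--         precedence = 0
--
--         if lex[0] in precedences:
--             precedence = precedences[lex[0]]
--
--         if precedence > high_index[1]:
--             high_index = (lex, precedence)
--
--     return high_index[0]
-- ===== SOURCE B (Python) =====
-- precedences = {
--     '+': 1,
--     '-': 1,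
--     '*': 2,
--     '/': 2,
--     '^': 3,
-- }
--
-- def find_highest_precedence(lexed):
--     # pass 1: precedence of every token (0 for non-operators)
--     precs = [precedences.get(lex[0], 0) for lex in lexed]
--     best = 0
--     for p in precs:
--         if p > best:
--             best = p
--     if best == 0:
--         return None
--     # pass 2: first token whose precedence is the maximum
--     for lex, p in zip(lexed, precs):
--         if p == best:
--             return lex
-- ===== Notes on version B (the rewrite author's own statement) =====
-- stated objective: alternative
-- what changed: Replaces the single running-best scan with two explicit passes: first compute the precedence of every token and the maximum precedence, then return the first token attaining that maximum (None if no operator was found).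
import Mathlib
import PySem

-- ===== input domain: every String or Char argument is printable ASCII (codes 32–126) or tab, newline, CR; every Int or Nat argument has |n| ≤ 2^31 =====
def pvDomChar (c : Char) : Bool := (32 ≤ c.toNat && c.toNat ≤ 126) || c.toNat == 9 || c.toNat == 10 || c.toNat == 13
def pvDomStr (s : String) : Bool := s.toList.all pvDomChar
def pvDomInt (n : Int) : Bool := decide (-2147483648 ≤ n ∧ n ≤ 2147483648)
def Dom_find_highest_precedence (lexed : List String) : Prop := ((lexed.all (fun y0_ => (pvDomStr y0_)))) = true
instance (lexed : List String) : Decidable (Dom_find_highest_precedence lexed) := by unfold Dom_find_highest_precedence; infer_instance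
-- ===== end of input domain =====

-- B structurally differs from A: two explicit passes (precedences + max, then first match) instead of a running-best scan.

-- ===== PORT A =====
-- shared helper: precedence of a token's first character (the module dict `precedences`);
-- 0 when the first character is not an operator.  `lex[0]` via PySem.Str.pyGet? (none = IndexError,
-- excluded by Pre_; the `none => 0` branch is unreachable inside Pre_).
def precChar (c : Char) : Int :=
  if c = '+' then 1 else if c = '-' then 1 else if c = '*' then 2
  else if c = '/' then 2 else if c = '^' then 3 else 0

def prec (lex : String) : Int :=
  match PySem.Str.pyGet? lex 0 with
  | some c => precChar c
  | none => 0

def find_highest_precedence (lexed : List String) : Option String :=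
  (lexed.foldl
    (fun hi lex =>
      let precedence := prec lex
      if hi.2 < precedence then (some lex, precedence) else hi)
    ((none : Option String), (0 : Int))).1

-- ===== PORT B =====
def find_highest_precedence_alt (lexed : List String) : Option String :=
  let precs := lexed.map prec
  let best := precs.foldl (fun b p => if b < p then p else b) 0
  if best = 0 then none
  else ((lexed.zip precs).find? (fun lp => lp.2 == best)).map Prod.fst

-- ===== PRECONDITION & SPEC =====
-- Pre_ excludes lists containing the empty string, on which A raises IndexError at lex[0].
def Pre_find_highest_precedence (lexed : List String) : Prop :=
  ∀ s ∈ lexed, s ≠ ""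
instance (lexed : List String) : Decidable (Pre_find_highest_precedence lexed) := by
  unfold Pre_find_highest_precedence; infer_instance
def pvWitness_find_highest_precedence : List String := ["1", "+", "2", "*", "3"]

def Spec_find_highest_precedence (lexed : List String) (out : Option String) : Prop := out = find_highest_precedence_alt lexed
instance (lexed : List String) (out : Option String) : Decidable (Spec_find_highest_precedence lexed out) := by unfold Spec_find_highest_precedence; infer_instance

-- ===== CLAIM (what is proved, stated in full; the proofs are below) =====
def Claim_equal_find_highest_precedence : Prop := ∀ (lexed : List String), Dom_find_highest_precedence lexed → Pre_find_highest_precedence lexed → Spec_find_highest_precedence lexed (find_highest_precedence lexed)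

-- ===== LEMMAS AND PROOFS =====

-- running max of precedences starting from b (the shape of both folds)
def runMax (b : Int) (l : List String) : Int :=
  l.foldl (fun a s => if a < prec s then prec s else a) b

-- first token of l with precedence m
def ffind (m : Int) (l : List String) : Option String :=
  match l with
  | [] => none
  | x :: xs => if prec x = m then some x else ffind m xs

theorem runMax_le (b : Int) (l : List String) : b ≤ runMax b l := by
  induction l generalizing b with
  | nil => simp [runMax]
  | cons x xs ih =>
    simp only [runMax, List.foldl_cons]
    by_cases h : b < prec x
    · simp only [if_pos h]; exact le_of_lt (lt_of_lt_of_le h (ih _))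
    · simp only [if_neg h]; exact ih b

theorem zip_find_eq_ffind (m : Int) (l : List String) :
    ((l.zip (l.map prec)).find? (fun lp => lp.2 == m)).map Prod.fst = ffind m l := by
  induction l with
  | nil => simp [ffind]
  | cons x xs ih =>
    simp only [List.map_cons, List.zip_cons_cons, List.find?, ffind]
    by_cases h : prec x = m
    · simp [h]
    · have hb : (prec x == m) = false := by simp [h]
      simp only [hb, if_neg h]
      exact ih

theorem runMax_cons (b : Int) (x : String) (xs : List String) :
    runMax b (x :: xs) = runMax (if b < prec x then prec x else b) xs := rfl

theorem afold_eq (l : List String) (o : Option String) (b : Int) :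
    (l.foldl
      (fun hi lex =>
        let precedence := prec lex
        if hi.2 < precedence then (some lex, precedence) else hi)
      (o, b)).1
    = if b < runMax b l then ffind (runMax b l) l else o := by
  induction l generalizing o b with
  | nil => simp [runMax]
  | cons x xs ih =>
    simp only [List.foldl_cons, ffind, runMax_cons]
    by_cases hbp : b < prec x
    · simp only [if_pos hbp]
      rw [ih]
      have hpm : prec x ≤ runMax (prec x) xs := runMax_le _ _
      by_cases hlt : prec x < runMax (prec x) xs
      · rw [if_pos hlt, if_pos (lt_trans hbp hlt), if_neg (by omega)]
      · have heq : runMax (prec x) xs = prec x := le_antisymm (by omega) hpm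
        rw [if_neg hlt, heq, if_pos hbp, if_pos rfl]
    · simp only [if_neg hbp]
      rw [ih]
      by_cases hlt : b < runMax b xs
      · rw [if_pos hlt, if_pos hlt, if_neg (by omega)]
      · rw [if_neg hlt, if_neg hlt]

-- ===== VERDICT (by name: the statement is the Claim_ definition above) =====
theorem find_highest_precedence_spec : Claim_equal_find_highest_precedence := by
  intro lexed _ _
  unfold Spec_find_highest_precedence find_highest_precedence find_highest_precedence_alt
  rw [afold_eq]
  simp only [List.foldl_map]
  show (if 0 < runMax 0 lexed then ffind (runMax 0 lexed) lexed else none)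
      = if runMax 0 lexed = 0 then none
        else ((lexed.zip (lexed.map prec)).find? (fun lp => lp.2 == runMax 0 lexed)).map Prod.fst
  rw [zip_find_eq_ffind]
  have h0 : (0 : Int) ≤ runMax 0 lexed := runMax_le 0 lexed
  by_cases h : (0 : Int) < runMax 0 lexed
  · rw [if_pos h, if_neg (by omega)]
  · rw [if_neg h, if_pos (by omega)]
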